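-- pv_equiv track=rewrite | github.com/murchie85/hackerrank_myway | stringValidators.py | iterateString
-- ===== SOURCE A (Python) =====
-- def iterateString(string):
--
-- 	alnum = "False"
-- 	for l in string:
-- 		if(l.isalnum() == True):
-- 			alnum = "True"
-- 			break
--
-- 	isalpha = "False"
-- 	for l in string:
-- 		if(l.isalpha() == True):
-- 			isalpha = "True"
-- 			break
--
-- 	isdigit = "False"
-- 	for l in string:
-- 		if(l.isdigit() == True):
-- 			isdigit = "True"
-- 			break
--
-- 	islower = "False"
-- 	for l in string:
-- 		if(l.islower() == True):
-- 			islower = "True"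
-- 			break
--
-- 	isupper = "False"
-- 	for l in string:
-- 		if(l.isupper() == True):
-- 			isupper = "True"
-- 			break
-- 	return(alnum,isalpha,isdigit,islower,isupper)
-- ===== SOURCE B (Python) =====
-- def iterateString(string):
--     alnum = alpha = digit = lower = upper = False
--     for l in string:
--         alnum = alnum or l.isalnum()
--         alpha = alpha or l.isalpha()
--         digit = digit or l.isdigit()
--         lower = lower or l.islower()
--         upper = upper or l.isupper()
--         if alnum and alpha and digit and lower and upper:
--             break
--     return tuple("True" if f else "False" for f in (alnum, alpha, digit, lower, upper))
-- ===== Notes on version B (the rewrite author's own statement) =====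
-- stated objective: alternative
-- what changed: Replaces A's five separate break-on-first-match scans of the string with a single pass maintaining five boolean flags (with early exit once all are set), converting the flags to their string forms at the end.
import Mathlib
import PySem

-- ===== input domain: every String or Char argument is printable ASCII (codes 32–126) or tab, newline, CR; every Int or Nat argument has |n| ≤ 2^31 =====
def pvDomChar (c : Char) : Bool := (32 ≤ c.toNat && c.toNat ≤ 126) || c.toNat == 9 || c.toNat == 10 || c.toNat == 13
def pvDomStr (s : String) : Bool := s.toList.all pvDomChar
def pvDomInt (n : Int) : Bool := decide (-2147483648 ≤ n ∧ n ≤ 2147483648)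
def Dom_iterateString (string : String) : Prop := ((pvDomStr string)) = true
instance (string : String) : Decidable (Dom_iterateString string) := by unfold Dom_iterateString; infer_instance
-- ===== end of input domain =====

-- B replaces A's five separate break-on-first-match scans with one pass over the string
-- maintaining five boolean flags (early exit once all are set); alternative decomposition, same cost.


-- ===== PORT A =====
-- each 'for l in string: if p(l): x = "True"; break' loop becomes this structural recursion
def scanA (p : Char → Bool) : List Char → String
  | [] => "False"
  | c :: cs => if p c == true then "True" else scanA p cs

def iterateString (string : String) : String × String × String × String × String :=
  (scanA PySem.Chars.isalnum string.toList,
   scanA PySem.Chars.isalpha string.toList,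
   scanA PySem.Chars.isdigit string.toList,
   scanA PySem.Chars.islower string.toList,
   scanA PySem.Chars.isupper string.toList)

-- ===== PORT B =====
def flagStr (b : Bool) : String := if b then "True" else "False"

-- the single flag-maintaining loop of Source B, with the early break
def goB : List Char → Bool → Bool → Bool → Bool → Bool → Bool × Bool × Bool × Bool × Bool
  | [], an, al, dg, lo, up => (an, al, dg, lo, up)
  | c :: cs, an, al, dg, lo, up =>
    let an := an || PySem.Chars.isalnum c
    let al := al || PySem.Chars.isalpha c
    let dg := dg || PySem.Chars.isdigit c
    let lo := lo || PySem.Chars.islower c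
    let up := up || PySem.Chars.isupper c
    if an && al && dg && lo && up then (an, al, dg, lo, up)
    else goB cs an al dg lo up

def iterateString_alt (string : String) : String × String × String × String × String :=
  let r := goB string.toList false false false false false
  (flagStr r.1, flagStr r.2.1, flagStr r.2.2.1, flagStr r.2.2.2.1, flagStr r.2.2.2.2)

-- ===== PRECONDITION & SPEC =====
def Spec_iterateString (string : String) (out : String × String × String × String × String) : Prop := out = iterateString_alt string
instance (string : String) (out : String × String × String × String × String) : Decidable (Spec_iterateString string out) := by unfold Spec_iterateString; infer_instance

-- ===== CLAIM (what is proved, stated in full; the proofs are below) =====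
def Claim_equal_iterateString : Prop := ∀ (string : String), Dom_iterateString string → Spec_iterateString string (iterateString string)

-- ===== LEMMAS AND PROOFS =====
theorem scanA_eq_any (p : Char → Bool) (l : List Char) : scanA p l = flagStr (l.any p) := by
  induction l with
  | nil => rfl
  | cons c cs ih =>
    simp only [scanA, List.any_cons, flagStr]
    by_cases h : p c = true <;> simp [h, ih, flagStr]

theorem goB_eq (l : List Char) (an al dg lo up : Bool) :
    goB l an al dg lo up =
      (an || l.any PySem.Chars.isalnum, al || l.any PySem.Chars.isalpha,
       dg || l.any PySem.Chars.isdigit, lo || l.any PySem.Chars.islower,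
       up || l.any PySem.Chars.isupper) := by
  induction l generalizing an al dg lo up with
  | nil => simp [goB]
  | cons c cs ih =>
    simp only [goB]
    split
    · rename_i h
      simp only [Bool.and_eq_true] at h
      obtain ⟨⟨⟨⟨h1, h2⟩, h3⟩, h4⟩, h5⟩ := h
      simp [List.any_cons, ← Bool.or_assoc, h1, h2, h3, h4, h5]
    · simp [ih, List.any_cons, Bool.or_assoc]

-- ===== VERDICT (by name: the statement is the Claim_ definition above) =====
theorem iterateString_spec : Claim_equal_iterateString := by
  intro s _
  unfold Spec_iterateString iterateString iterateString_alt
  simp [goB_eq, scanA_eq_any]
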